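-- pv_equiv track=rewrite | github.com/ryandkuster/advent_of_code | 2020/day_06/day_6_b.py | get_yes
-- ===== SOURCE A (Python) =====
-- def get_yes(entry_ls):
--     yes_count = 0
--     yes_all = ''.join(entry_ls)
--     yes_set = set(yes_all)
--     for char in yes_set:
--         if yes_all.count(char) == len(entry_ls):
--             yes_count += 1
--     return yes_count
-- ===== SOURCE B (Python) =====
-- def get_yes(entry_ls):
--     n = len(entry_ls)
--     count = 0
--     prev = None
--     run = 0
--     for c in sorted(''.join(entry_ls)):
--         if c == prev:
--             run += 1
--         else:
--             if run == n:
--                 count += 1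
--             prev = c
--             run = 1
--     if run > 0 and run == n:
--         count += 1
--     return count
-- ===== Notes on version B (the rewrite author's own statement) =====
-- stated objective: alternative
-- what changed: A builds a set of the joined characters and for each distinct character re-scans the whole joined string with .count; B sorts the joined characters once and makes a single grouped pass counting consecutive runs whose length equals len(entry_ls).
import Mathlib
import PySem

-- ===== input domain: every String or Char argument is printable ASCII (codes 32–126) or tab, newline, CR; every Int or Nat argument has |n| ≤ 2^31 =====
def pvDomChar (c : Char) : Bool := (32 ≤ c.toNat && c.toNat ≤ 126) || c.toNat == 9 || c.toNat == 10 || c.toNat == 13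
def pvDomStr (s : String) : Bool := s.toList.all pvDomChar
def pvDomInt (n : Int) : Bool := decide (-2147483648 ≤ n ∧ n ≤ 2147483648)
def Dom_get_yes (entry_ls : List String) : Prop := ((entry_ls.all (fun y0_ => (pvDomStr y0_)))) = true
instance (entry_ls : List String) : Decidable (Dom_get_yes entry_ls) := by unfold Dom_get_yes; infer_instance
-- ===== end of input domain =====

-- B replaces A's per-distinct-character rescans of the joined string by one sort of the
-- joined characters followed by a single grouped pass over runs (objective: alternative).

-- ===== PORT A =====
def get_yes (entry_ls : List String) : Int :=
  let yes_count : Int := 0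
  let yes_all : String := PySem.Str.join "" entry_ls
  let yes_set : PySem.Set Char := PySem.Set.ofList yes_all.toList
  yes_set.foldl
    (fun acc ch =>
      if (PySem.Str.count yes_all (String.ofList [ch]) : Int) = (entry_ls.length : Int)
      then acc + 1 else acc)
    yes_count

-- ===== PORT B =====
-- the single grouped pass of Source B: prev / run / count carried through the sorted characters
def bwalk (n : Int) : List Char → Option Char → Int → Int → Int
  | [], _, run, acc => if 0 < run ∧ run = n then acc + 1 else acc
  | c :: rest, prev, run, acc =>
    if some c = prev then bwalk n rest prev (run + 1) acc
    else bwalk n rest (some c) 1 (if run = n then acc + 1 else acc)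

def get_yes_alt (entry_ls : List String) : Int :=
  let n : Int := entry_ls.length
  let chars : List Char := PySem.List.sorted (PySem.Str.join "" entry_ls).toList (fun c => c)
  bwalk n chars none 0 0

-- ===== PRECONDITION & SPEC =====
def Spec_get_yes (entry_ls : List String) (out : Int) : Prop := out = get_yes_alt entry_ls
instance (entry_ls : List String) (out : Int) : Decidable (Spec_get_yes entry_ls out) := by unfold Spec_get_yes; infer_instance

-- ===== CLAIM (what is proved, stated in full; the proofs are below) =====
def Claim_equal_get_yes : Prop := ∀ (entry_ls : List String), Dom_get_yes entry_ls → Spec_get_yes entry_ls (get_yes entry_ls)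

-- ===== LEMMAS AND PROOFS =====


-- yes_all.count(char) with a 1-character needle is a plain character count
lemma chars_count_go_singleton (c : Char) :
    ∀ (fuel : Nat) (s : List Char) (acc : Nat), s.length ≤ fuel →
      PySem.Chars.count.go [c] fuel s acc = acc + s.count c := by
  intro fuel
  induction fuel with
  | zero =>
    intro s acc h
    have : s = [] := List.length_eq_zero_iff.mp (Nat.le_zero.mp h)
    subst this
    simp [PySem.Chars.count.go]
  | succ f ih =>
    intro s acc h
    cases s with
    | nil => simp [PySem.Chars.count.go]
    | cons hd t =>
      by_cases hc : c = hd
      · subst hc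
        have hpre : [c].isPrefixOf (c :: t) = true := by simp [List.isPrefixOf]
        rw [PySem.Chars.count.go, if_pos hpre]
        simp only [List.length_singleton, List.drop_one, List.tail_cons]
        rw [ih t (acc + 1) (by simpa using Nat.lt_succ_iff.mp (by simpa using h))]
        simp only [List.count_cons_self]
        omega
      · have hpre : [c].isPrefixOf (hd :: t) = false := by
          simp [List.isPrefixOf, hc]
        rw [PySem.Chars.count.go, if_neg (by simp [hpre])]
        rw [ih t acc (by simpa using Nat.lt_succ_iff.mp (by simpa using h))]
        simp only [List.count_cons]
        simp [Ne.symm hc]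

lemma chars_count_singleton (s : List Char) (c : Char) :
    PySem.Chars.count s [c] = s.count c := by
  rw [PySem.Chars.count]
  simp only [List.isEmpty_cons]
  simpa using chars_count_go_singleton c s.length s 0 le_rfl

-- the grouped pass on a sorted tail: value = pending-run check + distinct other chars hitting n
lemma bwalk_sorted (n : Int) :
    ∀ (S : List Char), S.Pairwise (· ≤ ·) →
      ∀ (c : Char) (r acc : Int), 1 ≤ r → (∀ x ∈ S, c ≤ x) →
        bwalk n S (some c) r acc =
          acc + (if r + (S.count c : Int) = n then 1 else 0) +
            (((S.toFinset.erase c).filter (fun d => (S.count d : Int) = n)).card : Int) := by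
  intro S
  induction S with
  | nil =>
    intro _ c r acc hr _
    simp only [bwalk, List.count_nil, List.toFinset_nil]
    have h1 : (0 < r ∧ r = n) ↔ (r + (0:Int) = n) := by constructor <;> (intro h; omega)
    simp only [Finset.erase_empty, Finset.filter_empty, Finset.card_empty]
    split_ifs <;> push_cast <;> omega
  | cons x T ih =>
    intro hp c r acc hr hle
    have hxT : ∀ y ∈ T, x ≤ y := fun y hy => (List.pairwise_cons.mp hp).1 y hy
    have hpT : T.Pairwise (· ≤ ·) := (List.pairwise_cons.mp hp).2
    by_cases hxc : x = c
    · subst hxc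
      rw [bwalk, if_pos rfl]
      rw [ih hpT x (r+1) acc (by omega) hxT]
      have hcnt : ((x :: T).count x : Int) = (T.count x : Int) + 1 := by
        simp
      have hers : ((x :: T).toFinset.erase x) = (T.toFinset.erase x) := by
        ext d; simp
      have harg : r + 1 + (T.count x : Int) = r + ((x :: T).count x : Int) := by
        rw [hcnt]; ring
      have hfe : ((T.toFinset.erase x).filter (fun d => (T.count d : Int) = n))
          = ((T.toFinset.erase x).filter (fun d => ((x :: T).count d : Int) = n)) := by
        apply Finset.filter_congr
        intro d hd
        have hdx : d ≠ x := (Finset.mem_erase.mp hd).1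
        simp [Ne.symm hdx]
      rw [hers, harg, hfe]
    · -- x ≠ c, and c < x so c ∉ x :: T
      have hcx : c < x := lt_of_le_of_ne (hle x (List.mem_cons_self)) (fun h => hxc h.symm)
      have hcnot : c ∉ x :: T := by
        intro hmem
        rcases List.mem_cons.mp hmem with h | h
        · exact absurd h.symm (ne_of_gt hcx)
        · exact absurd (hxT c h) (not_le.mpr hcx)
      have hcnt0 : ((x :: T).count c : Int) = 0 := by
        simp [List.count_eq_zero_of_not_mem hcnot]
      rw [bwalk, if_neg (by simp [hxc])]
      rw [ih hpT x 1 _ le_rfl hxT]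
      have hers : ((x :: T).toFinset.erase c) = insert x (T.toFinset.erase x) := by
        ext d
        simp only [Finset.mem_erase, List.mem_toFinset, List.mem_cons, Finset.mem_insert]
        constructor
        · rintro ⟨hdc, h | h⟩
          · exact Or.inl h
          · by_cases hdx : d = x
            · exact Or.inl hdx
            · exact Or.inr ⟨hdx, h⟩
        · rintro (h | ⟨hdx, h⟩)
          · subst h; exact ⟨hxc, Or.inl rfl⟩
          · refine ⟨?_, Or.inr h⟩
            intro hdc; subst hdc
            exact hcnot (List.mem_cons_of_mem x h)
      rw [hers]
      have hxnot : x ∉ (T.toFinset.erase x) := Finset.notMem_erase x _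
      rw [Finset.filter_insert]
      have hfc : ((T.toFinset.erase x).filter (fun d => ((x :: T).count d : Int) = n))
          = ((T.toFinset.erase x).filter (fun d => (T.count d : Int) = n)) := by
        apply Finset.filter_congr
        intro d hd
        have hdx : d ≠ x := (Finset.mem_erase.mp hd).1
        simp [Ne.symm hdx]
      have hcx2 : ((x :: T).count x : Int) = 1 + (T.count x : Int) := by
        simp; ring
      by_cases hpx : (1 : Int) + (T.count x : Int) = n
      · rw [if_pos (hcx2.trans hpx)]
        rw [Finset.card_insert_of_notMem (fun h => hxnot (Finset.mem_filter.mp h).1)]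
        rw [hfc, hcnt0]
        push_cast
        split_ifs <;> omega
      · rw [if_neg (fun hcon => hpx (hcx2.symm.trans hcon))]
        rw [hfc, hcnt0]
        split_ifs <;> omega

lemma countP_eq_card_filter (l : List Char) (hl : l.Nodup) (P : Char → Prop) [DecidablePred P] :
    (l.countP (fun c => decide (P c)) : Int) = ((l.toFinset.filter P).card : Int) := by
  have h2 : (l.filter (fun c => decide (P c))).Nodup := hl.filter _
  rw [List.countP_eq_length_filter, ← List.toFinset_card_of_nodup h2, List.toFinset_filter]
  norm_cast
  congr 1
  apply Finset.filter_congr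
  intro d _
  simp

-- top-level B: sorted nonempty head start
lemma bwalk_start (n : Int) (x : Char) (T : List Char)
    (hp : (x :: T).Pairwise (· ≤ ·)) (hn : 1 ≤ n) :
    bwalk n (x :: T) none 0 0 =
      (((x :: T).toFinset.filter (fun d => ((x :: T).count d : Int) = n)).card : Int) := by
  have hxT : ∀ y ∈ T, x ≤ y := fun y hy => (List.pairwise_cons.mp hp).1 y hy
  have hpT : T.Pairwise (· ≤ ·) := (List.pairwise_cons.mp hp).2
  rw [bwalk, if_neg (by simp)]
  rw [if_neg (by omega)]
  rw [bwalk_sorted n T hpT x 1 0 le_rfl hxT]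
  have hins : (x :: T).toFinset = insert x (T.toFinset.erase x) := by
    ext d
    simp only [List.mem_toFinset, List.mem_cons, Finset.mem_insert, Finset.mem_erase]
    by_cases hdx : d = x <;> simp [hdx]
  rw [hins, Finset.filter_insert]
  have hxnot : x ∉ (T.toFinset.erase x) := Finset.notMem_erase x _
  have hfc : ((T.toFinset.erase x).filter (fun d => ((x :: T).count d : Int) = n))
      = ((T.toFinset.erase x).filter (fun d => (T.count d : Int) = n)) := by
    apply Finset.filter_congr
    intro d hd
    have hdx : d ≠ x := (Finset.mem_erase.mp hd).1
    simp [Ne.symm hdx]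
  have hcx2 : ((x :: T).count x : Int) = 1 + (T.count x : Int) := by
    simp; ring
  by_cases hpx : (1 : Int) + (T.count x : Int) = n
  · rw [if_pos (hcx2.trans hpx)]
    rw [Finset.card_insert_of_notMem (fun h => hxnot (Finset.mem_filter.mp h).1)]
    rw [hfc]
    push_cast
    split_ifs <;> omega
  · rw [if_neg (fun hcon => hpx (hcx2.symm.trans hcon))]
    rw [hfc]
    split_ifs <;> omega

-- ===== VERDICT (by name: the statement is the Claim_ definition above) =====
theorem get_yes_spec : Claim_equal_get_yes := by
  intro entry_ls _
  unfold Spec_get_yes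
  set n : Int := (entry_ls.length : Int) with hn
  set L : List Char := (PySem.Str.join "" entry_ls).toList with hLdef
  set S : List Char := PySem.List.sorted L (fun c => c) with hSdef
  have hperm : S.Perm L := PySem.List.sorted_perm L (fun c => c) false
  -- A counts, over the distinct joined characters, those whose total count is n
  have hA : get_yes entry_ls = ((L.toFinset.filter (fun c => (L.count c : Int) = n)).card : Int) := by
    unfold get_yes
    rw [PySem.List.foldl_ite_add_one
      (fun ch => (PySem.Str.count (PySem.Str.join "" entry_ls) (String.ofList [ch]) : Int) = n)]
    rw [List.countP_congr (q := fun c => decide ((L.count c : Int) = n))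
      (fun c _ => by simp [PySem.Str.count_eq, chars_count_singleton, hLdef])]
    rw [countP_eq_card_filter _ (PySem.Set.nodup_ofList L) _]
    have hfs : (PySem.Set.ofList L : List Char).toFinset = L.toFinset := by
      ext d; simp [PySem.Set.mem_ofList]
    rw [hfs]
    omega
  -- B equals the same cardinality, computed on the sorted list
  have hB : get_yes_alt entry_ls = ((S.toFinset.filter (fun d => (S.count d : Int) = n)).card : Int) := by
    show bwalk n S none 0 0 = _
    cases hcase : S with
    | nil =>
      simp [bwalk]
    | cons x T =>
      have hp : S.Pairwise (· ≤ ·) := PySem.List.sorted_pairwise L (fun c => c)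
      have hne : entry_ls ≠ [] := by
        intro h
        rw [h] at hLdef
        have hLnil : L = [] := by rw [hLdef]; decide
        rw [hLnil] at hSdef
        have : S = [] := by rw [hSdef]; decide
        rw [this] at hcase
        exact absurd hcase.symm (List.cons_ne_nil x T)
      have hn1 : 1 ≤ n := by
        rw [hn]
        have := List.length_pos_of_ne_nil hne
        omega
      rw [hcase] at hp
      exact bwalk_start n x T hp hn1
  rw [hA, hB]
  have hts : S.toFinset = L.toFinset := by
    ext d; simp [hperm.mem_iff]
  rw [hts]
  congr 1
  congr 1
  apply Finset.filter_congr
  intro d _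
  simp [hperm.count_eq d]
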